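-- pv_equiv track=rewrite | github.com/Arhum2/Leet-Code | riverRecords.py | maxTrailing
-- ===== SOURCE A (Python) =====
-- def maxTrailing(levels):
--     dict = {}
--
--     for i in range(len(levels)):
--         dict[levels[i]] = 0
--         j = 0
--         while j < i:
--             x = levels[i] - levels[j]
--             if dict[levels[i]] < x:
--                 dict[levels[i]] = x
--             j += 1
--
--     vals = dict.values()
--
--     if min(vals) - max(vals) == 0:
--         return -1
--
--     else:
--         return max(vals)
-- ===== SOURCE B (Python) =====
-- def maxTrailing(levels):
--     # One pass: running prefix minimum replaces the O(n^2) inner scan.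
--     gains = {}
--     m = None
--     for v in levels:
--         gains[v] = 0 if m is None or v - m <= 0 else v - m
--         if m is None or v < m:
--             m = v
--     vals = gains.values()
--     lo, hi = min(vals), max(vals)
--     return -1 if lo == hi else hi
-- ===== Notes on version B (the rewrite author's own statement) =====
-- stated objective: faster
-- what changed: Replaces A's O(n^2) inner rescan of all earlier levels at each step by a single pass that carries the running prefix minimum, writing each level's gain max(0, v - prefix_min) into the dict with the same overwrite semantics.
import Mathlib
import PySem

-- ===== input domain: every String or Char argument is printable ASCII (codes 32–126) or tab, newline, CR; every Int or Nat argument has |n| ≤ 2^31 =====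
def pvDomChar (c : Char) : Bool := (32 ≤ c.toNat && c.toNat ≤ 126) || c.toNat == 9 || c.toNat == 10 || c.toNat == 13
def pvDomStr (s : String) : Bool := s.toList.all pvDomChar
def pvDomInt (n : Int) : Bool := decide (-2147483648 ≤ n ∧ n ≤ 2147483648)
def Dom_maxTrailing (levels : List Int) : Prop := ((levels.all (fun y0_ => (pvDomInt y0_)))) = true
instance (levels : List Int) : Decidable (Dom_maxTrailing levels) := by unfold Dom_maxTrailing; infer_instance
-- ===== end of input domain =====

-- B replaces A's quadratic inner rescan by a single pass carrying the running prefix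
-- minimum (same dict-overwrite semantics, same final min/max comparison).

-- ===== PORT A =====
-- inner 'while j < i' loop of A (reads/writes dict key v)
def pvInnerA (levels : List Int) (v : Int) (i : Int) (d : PySem.Dict Int Int) : PySem.Dict Int Int :=
  (PySem.List.pyRange 0 i).foldl (fun d j =>
    let x := v - PySem.List.pyGetD levels j 0
    if d.getD v 0 < x then d.insert v x else d) d

-- the dict built by A's 'for i in range(len(levels))' loop
def pvDictA (levels : List Int) : PySem.Dict Int Int :=
  (PySem.List.pyRange 0 (PySem.List.len levels)).foldl
    (fun d i =>
      let v := PySem.List.pyGetD levels i 0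
      pvInnerA levels v i (d.insert v 0)) PySem.Dict.empty

def maxTrailing (levels : List Int) : Int :=
  let vals := (pvDictA levels).values
  -- min()/max() on empty vals raise ValueError in Python: Pre_ excludes levels = []
  match PySem.List.min? vals (fun y => y), PySem.List.max? vals (fun y => y) with
  | some lo, some hi => if lo - hi = 0 then -1 else hi
  | _, _ => 0

-- ===== PORT B =====
-- one step of B's single pass: state = (gains dict, running prefix minimum)
def pvStepB (st : PySem.Dict Int Int × Option Int) (v : Int) : PySem.Dict Int Int × Option Int :=
  let gain : Int := match st.2 with
    | none => 0
    | some m => if v - m ≤ 0 then 0 else v - m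
  let m' : Option Int := match st.2 with
    | none => some v
    | some m => if v < m then some v else some m
  (st.1.insert v gain, m')

def pvFoldB (levels : List Int) : PySem.Dict Int Int × Option Int :=
  levels.foldl pvStepB (PySem.Dict.empty, none)

def maxTrailing_alt (levels : List Int) : Int :=
  let vals := (pvFoldB levels).1.values
  -- min()/max() on empty vals raise ValueError in Python: Pre_ excludes levels = []
  let lo := (PySem.List.min? vals (fun y => y)).getD 0
  let hi := (PySem.List.max? vals (fun y => y)).getD 0
  if lo = hi then -1 else hi

-- ===== PRECONDITION & SPEC =====
-- Pre_ excludes only the empty list, on which A (and B) raise ValueError (min() of empty values).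
def Pre_maxTrailing (levels : List Int) : Prop := levels ≠ []
instance (levels : List Int) : Decidable (Pre_maxTrailing levels) := by unfold Pre_maxTrailing; infer_instance
def pvWitness_maxTrailing : List Int := [3, 1, 4]

def Spec_maxTrailing (levels : List Int) (out : Int) : Prop := out = maxTrailing_alt levels
instance (levels : List Int) (out : Int) : Decidable (Spec_maxTrailing levels out) := by unfold Spec_maxTrailing; infer_instance

-- ===== CLAIM (what is proved, stated in full; the proofs are below) =====
def Claim_equal_maxTrailing : Prop := ∀ (levels : List Int), Dom_maxTrailing levels → Pre_maxTrailing levels → Spec_maxTrailing levels (maxTrailing levels)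

-- ===== LEMMAS AND PROOFS =====

-- A's inner loop only touches key v: it equals one insert of the folded value.
theorem pvInner_insert (js : List Int) (d : PySem.Dict Int Int) (v : Int) (xf : Int → Int) :
    ∀ c, js.foldl (fun d j => if d.getD v 0 < xf j then d.insert v (xf j) else d) (d.insert v c)
      = d.insert v (js.foldl (fun c j => if c < xf j then xf j else c) c) := by
  induction js with
  | nil => intro c; rfl
  | cons j t ih =>
      intro c
      simp only [List.foldl_cons, PySem.Dict.getD_insert_self]
      by_cases h : c < xf j
      · simp only [h, if_pos h, PySem.Dict.insert_insert_self, ih, if_true]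
      · simp only [h, if_neg h, ih, if_false]

-- running-max fold against a running minimum
theorem pvMaxfold (v : Int) (pre : List Int) :
    ∀ a m : Int, pre.foldl (fun c u => if c < v - u then v - u else c) (max a (v - m))
      = max a (v - pre.foldl min m) := by
  induction pre with
  | nil => intro a m; rfl
  | cons x t ih =>
      intro a m
      have h1 : (if max a (v - m) < v - x then v - x else max a (v - m)) = max a (v - min m x) := by
        rcases le_total m x with h | h <;> simp [min_eq_left, min_eq_right, h] <;> omega
      simp only [List.foldl_cons, h1, ih]

theorem pvGainFold (v : Int) (x : Int) (t : List Int) :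
    (x :: t).foldl (fun c u => if c < v - u then v - u else c) 0
      = max 0 (v - t.foldl min x) := by
  simp only [List.foldl_cons]
  rw [show (if (0 : Int) < v - x then v - x else 0) = max 0 (v - x) by split_ifs <;> omega]
  exact pvMaxfold v t 0 x

-- B's second component is the running minimum of the processed prefix
theorem pvFoldB_snd (t : List Int) : ∀ (d : PySem.Dict Int Int) (m : Int),
    (t.foldl pvStepB (d, some m)).2 = some (t.foldl min m) := by
  induction t with
  | nil => intro d m; rfl
  | cons x s ih =>
      intro d m
      have hx : (if x < m then some x else some m) = some (min m x) := by
        rcases le_total m x with h | h <;> simp [min_eq_left, min_eq_right, h] <;> omega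
      simp only [List.foldl_cons, pvStepB, hx, ih]

theorem pvGetD_append_left (l : List Int) (w : Int) (j : Int) (h0 : 0 ≤ j)
    (h : j < (l.length : Int)) (dflt : Int) :
    PySem.List.pyGetD (l ++ [w]) j dflt = PySem.List.pyGetD l j dflt := by
  obtain ⟨n, rfl⟩ := Int.eq_ofNat_of_zero_le h0
  have hn : n < l.length := by exact_mod_cast h
  rw [PySem.List.pyGetD_natCast, PySem.List.pyGetD_natCast]
  simp [List.getD, List.getElem?_append_left hn]

theorem pvInnerA_append (l : List Int) (w v : Int) (i : Int) (hi : i ≤ (l.length : Int))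
    (d : PySem.Dict Int Int) : pvInnerA (l ++ [w]) v i d = pvInnerA l v i d := by
  unfold pvInnerA
  refine PySem.List.foldl_congr_mem _ _ _ _ ?_
  intro acc j hj
  rw [PySem.List.mem_pyRange_one] at hj
  rw [pvGetD_append_left l w j hj.1 (lt_of_lt_of_le hj.2 hi)]

theorem pvDictA_append (l : List Int) (v : Int) :
    pvDictA (l ++ [v]) = pvInnerA l v (l.length : Int) ((pvDictA l).insert v 0) := by
  have hlen2 : PySem.List.len l = (l.length : Int) := by simp [PySem.List.len]
  have hlen : PySem.List.len (l ++ [v]) = (l.length : Int) + 1 := by simp [PySem.List.len]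
  have hv : PySem.List.pyGetD (l ++ [v]) (l.length : Int) 0 = v := by
    rw [PySem.List.pyGetD_natCast]
    simp [List.getD]
  have hcongr : (PySem.List.pyRange 0 (l.length : Int)).foldl
      (fun d i => pvInnerA (l ++ [v]) (PySem.List.pyGetD (l ++ [v]) i 0) i
        (d.insert (PySem.List.pyGetD (l ++ [v]) i 0) 0)) PySem.Dict.empty
      = (PySem.List.pyRange 0 (l.length : Int)).foldl
      (fun d i => pvInnerA l (PySem.List.pyGetD l i 0) i
        (d.insert (PySem.List.pyGetD l i 0) 0)) PySem.Dict.empty := by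
    refine PySem.List.foldl_congr_mem _ _ _ _ ?_
    intro acc i hi
    rw [PySem.List.mem_pyRange_one] at hi
    rw [pvGetD_append_left l v i hi.1 hi.2,
        pvInnerA_append l v _ i (le_of_lt hi.2)]
  unfold pvDictA
  rw [hlen, hlen2, PySem.List.pyRange_one_succ_right (by positivity), List.foldl_append]
  simp only [List.foldl_cons, List.foldl_nil]
  rw [hv, pvInnerA_append l v v (l.length : Int) (le_refl _), hcongr]

-- the value A's inner loop folds for v over the already-seen prefix l
theorem pvInnerA_full (l : List Int) (v : Int) (d : PySem.Dict Int Int) :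
    pvInnerA l v (l.length : Int) (d.insert v 0)
      = d.insert v (l.foldl (fun c u => if c < v - u then v - u else c) 0) := by
  unfold pvInnerA
  rw [pvInner_insert]
  congr 1
  have hmap := PySem.List.map_pyGetD_pyRange_zero l 0
  calc (PySem.List.pyRange 0 (l.length : Int)).foldl
        (fun c j => if c < v - PySem.List.pyGetD l j 0 then v - PySem.List.pyGetD l j 0 else c) 0
      = ((PySem.List.pyRange 0 (PySem.List.len l)).map (fun j => PySem.List.pyGetD l j 0)).foldl
        (fun c u => if c < v - u then v - u else c) 0 := by
        rw [List.foldl_map]; rfl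
    _ = l.foldl (fun c u => if c < v - u then v - u else c) 0 := by rw [hmap]

-- main invariant: A's dict equals the dict of B's single pass
theorem pvDict_eq (levels : List Int) : pvDictA levels = (pvFoldB levels).1 := by
  induction levels using List.reverseRecOn with
  | nil => rfl
  | append_singleton l v ih =>
      rw [pvDictA_append, pvInnerA_full, ih]
      unfold pvFoldB
      rw [List.foldl_append]
      simp only [List.foldl_cons, List.foldl_nil]
      rcases l with _ | ⟨x, t⟩
      · rfl
      · have hsnd : ((x :: t).foldl pvStepB (PySem.Dict.empty, none)).2
            = some (t.foldl min x) := by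
          simp only [List.foldl_cons, pvStepB]
          exact pvFoldB_snd t _ x
        simp only [pvStepB, hsnd, pvGainFold]
        congr 1
        rcases le_total (v - t.foldl min x) 0 with h | h <;>
          simp [max_eq_left, max_eq_right, h] <;> omega

theorem pvInsert_items_ne (d : PySem.Dict Int Int) (k v : Int) :
    (d.insert k v).items ≠ [] := by
  by_cases h : d.contains k
  · rw [PySem.Dict.items_insert_of_contains d v h]
    intro hmap
    have : d.items = [] := by simpa using congrArg List.length hmap
    simp [PySem.Dict.contains, PySem.Dict.items] at h
    rcases d with ⟨items⟩
    simp [PySem.Dict.items] at this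
    subst this
    simp [PySem.Dict.contains] at h
  · rw [PySem.Dict.items_insert_of_not_contains d v (by simpa using h)]
    simp

theorem pvFoldB_items_ne (t : List Int) :
    ∀ st : PySem.Dict Int Int × Option Int, st.1.items ≠ [] →
      (t.foldl pvStepB st).1.items ≠ [] := by
  induction t with
  | nil => intro st h; exact h
  | cons x s ih =>
      intro st _
      exact ih (pvStepB st x) (pvInsert_items_ne st.1 x _)

-- ===== VERDICT (by name: the statement is the Claim_ definition above) =====
theorem maxTrailing_spec : Claim_equal_maxTrailing := by
  intro levels _ hpre
  rcases levels with _ | ⟨x, t⟩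
  · exact absurd rfl hpre
  · unfold Spec_maxTrailing maxTrailing maxTrailing_alt
    rw [pvDict_eq]
    have hne : ((pvFoldB (x :: t)).1.values) ≠ [] := by
      have h1 : (pvFoldB (x :: t)).1.items ≠ [] := by
        unfold pvFoldB
        rw [List.foldl_cons]
        exact pvFoldB_items_ne t _ (pvInsert_items_ne _ x _)
      simpa [PySem.Dict.values] using h1
    rcases hmin : PySem.List.min? ((pvFoldB (x :: t)).1.values) (fun y => y) with _ | lo
    · exact absurd ((PySem.List.min?_eq_none_iff _ _).mp hmin) hne
    rcases hmax : PySem.List.max? ((pvFoldB (x :: t)).1.values) (fun y => y) with _ | hi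
    · exact absurd ((PySem.List.max?_eq_none_iff _ _).mp hmax) hne
    simp only [hmin, hmax, Option.getD_some]
    split_ifs <;> omega
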